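-- pv_equiv track=rewrite | github.com/fuongfotfet/document_extractor | test_excel_processing.py | count_duplicate_patterns
-- ===== SOURCE A (Python) =====
-- def count_duplicate_patterns(text: str) -> int:
--     """
--     Count potential duplicate patterns in text
--     """
--     lines = text.split('\n')
--     duplicate_count = 0
--
--     for line in lines:
--         if '|' in line:  # Table line
--             cells = [cell.strip() for cell in line.split('|')[1:-1]]  # Remove empty first/last
--             if len(cells) > 1:
--                 # Count consecutive duplicates
--                 for i in range(1, len(cells)):
--                     if cells[i] == cells[i-1] and cells[i].strip() and cells[i] != 'None':
--                         duplicate_count += 1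
--
--     return duplicate_count
-- ===== SOURCE B (Python) =====
-- def count_duplicate_patterns(text: str) -> int:
--     """
--     Count potential duplicate patterns in text (run-length scan per table line).
--     """
--     total = 0
--     for line in text.split('\n'):
--         if '|' in line:  # Table line
--             cells = [cell.strip() for cell in line.split('|')[1:-1]]
--             while cells:
--                 head = cells[0]
--                 run = 1
--                 while run < len(cells) and cells[run] == head:
--                     run += 1
--                 if head.strip() and head != 'None':
--                     total += run - 1
--                 cells = cells[run:]
--     return total
-- ===== Notes on version B (the rewrite author's own statement) =====
-- stated objective: alternative
-- what changed: The per-line index loop comparing cells[i] with cells[i-1] is replaced by a run-length scan: for each maximal run of equal cells, add run-1 once if the run's value passes the same non-empty/non-null guard.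
import Mathlib
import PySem

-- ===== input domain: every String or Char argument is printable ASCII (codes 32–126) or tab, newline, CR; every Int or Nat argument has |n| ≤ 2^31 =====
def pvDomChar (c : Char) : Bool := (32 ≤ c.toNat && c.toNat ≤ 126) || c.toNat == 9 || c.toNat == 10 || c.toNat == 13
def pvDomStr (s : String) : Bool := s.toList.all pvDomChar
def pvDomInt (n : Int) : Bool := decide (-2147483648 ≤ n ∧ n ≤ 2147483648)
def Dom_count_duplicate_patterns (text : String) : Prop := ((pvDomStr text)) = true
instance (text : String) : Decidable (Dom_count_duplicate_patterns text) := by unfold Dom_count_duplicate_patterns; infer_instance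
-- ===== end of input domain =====

-- B replaces A's index loop over cell pairs by a run-length scan per line (alternative decomposition, same cost).

-- ===== PORT A =====
def count_duplicate_patterns (text : String) : Int :=
  let lines := (PySem.Str.split? text "\n").getD []
  lines.foldl (fun acc line =>
    if PySem.Str.isIn "|" line then
      let cells := (PySem.List.slice ((PySem.Str.split? line "|").getD []) (some 1) (some (-1))).map PySem.Str.strip
      if cells.length > 1 then
        (PySem.List.pyRange 1 (cells.length : Int) 1).foldl (fun dc i =>
          if (PySem.List.pyGetD cells i "") == (PySem.List.pyGetD cells (i-1) "")
              && PySem.Str.strip (PySem.List.pyGetD cells i "") != ""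
              && (PySem.List.pyGetD cells i "") != "None"
          then dc + 1 else dc) acc
      else acc
    else acc) 0

-- ===== PORT B =====
-- B's inner while loop: length of the leading run of `rest` equal to `head` (run = 1 + this)
def pvRunLen (head : String) : List String → Nat
  | [] => 0
  | c :: t => if c == head then 1 + pvRunLen head t else 0

-- B's outer while loop over `cells`: consume one maximal run at a time.
-- `fuel` is only a structural totality guard; it is set to `cells.length`, which the loop never exhausts.
def pvRunCountF : Nat → List String → Int
  | _, [] => 0
  | 0, _ :: _ => 0
  | fuel + 1, head :: rest =>
      let k := pvRunLen head rest
      (if PySem.Str.strip head != "" && head != "None" then (k : Int) else 0)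
        + pvRunCountF fuel (rest.drop k)

def count_duplicate_patterns_alt (text : String) : Int :=
  ((PySem.Str.split? text "\n").getD []).foldl (fun total line =>
    if PySem.Str.isIn "|" line then
      let cells := (PySem.List.slice ((PySem.Str.split? line "|").getD []) (some 1) (some (-1))).map PySem.Str.strip
      total + pvRunCountF cells.length cells
    else total) 0

-- ===== PRECONDITION & SPEC =====
def Spec_count_duplicate_patterns (text : String) (out : Int) : Prop := out = count_duplicate_patterns_alt text
instance (text : String) (out : Int) : Decidable (Spec_count_duplicate_patterns text out) := by unfold Spec_count_duplicate_patterns; infer_instance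

-- ===== CLAIM (what is proved, stated in full; the proofs are below) =====
def Claim_equal_count_duplicate_patterns : Prop := ∀ (text : String), Dom_count_duplicate_patterns text → Spec_count_duplicate_patterns text (count_duplicate_patterns text)

-- ===== LEMMAS AND PROOFS =====

-- A's pair condition and its structural count over adjacent pairs
def pvCond (b a : String) : Bool :=
  b == a && PySem.Str.strip b != "" && b != "None"

def pvPairCount : List String → Int
  | a :: b :: t => (if pvCond b a then 1 else 0) + pvPairCount (b :: t)
  | _ => 0

theorem pvPairCount_short (l : List String) (h : l.length ≤ 1) : pvPairCount l = 0 := by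
  match l with
  | [] => rfl
  | [a] => rfl
  | a :: b :: t => simp at h

theorem pv_bridge (cells : List String) : ∀ (fuel k : Nat) (acc : Int),
    cells.length ≤ k + fuel →
    (PySem.List.pyRange ((k : Int) + 1) (cells.length : Int) 1).foldl (fun dc i =>
      if (PySem.List.pyGetD cells i "") == (PySem.List.pyGetD cells (i-1) "")
          && PySem.Str.strip (PySem.List.pyGetD cells i "") != ""
          && (PySem.List.pyGetD cells i "") != "None"
      then dc + 1 else dc) acc
      = acc + pvPairCount (cells.drop k) := by
  intro fuel
  induction fuel with
  | zero =>
      intro k acc hk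
      rw [PySem.List.pyRange_one_eq_nil (by exact_mod_cast (by omega : cells.length ≤ k + 1))]
      rw [pvPairCount_short _ (by simp; omega)]
      simp
  | succ fuel ih =>
      intro k acc hk
      by_cases hlt : k + 1 < cells.length
      · rw [PySem.List.pyRange_one_cons (by exact_mod_cast hlt)]
        simp only [List.foldl_cons]
        have hcast : (k : Int) + 1 + 1 = ((k + 1 : Nat) : Int) + 1 := by push_cast; ring
        rw [hcast, ih (k+1) _ (by omega)]
        have hk1 : k + 1 < cells.length := hlt
        have hk0 : k < cells.length := by omega
        have e1 : PySem.List.pyGetD cells ((k : Int) + 1) "" = cells[k+1] := by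
          have h2 : (k : Int) + 1 = ((k + 1 : Nat) : Int) := by push_cast; ring
          rw [h2, PySem.List.pyGetD_natCast, List.getD_eq_getElem _ _ hk1]
        have e0 : PySem.List.pyGetD cells ((k : Int) + 1 - 1) "" = cells[k] := by
          have h2 : (k : Int) + 1 - 1 = ((k : Nat) : Int) := by ring
          rw [h2, PySem.List.pyGetD_natCast, List.getD_eq_getElem _ _ hk0]
        rw [e1, e0]
        have hdrop : cells.drop k = cells[k] :: cells[k+1] :: cells.drop (k+2) := by
          rw [List.drop_eq_getElem_cons hk0, List.drop_eq_getElem_cons hk1]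
        have hdrop1 : cells.drop (k+1) = cells[k+1] :: cells.drop (k+2) := by
          rw [List.drop_eq_getElem_cons hk1]
        rw [hdrop]
        simp only [pvPairCount, ← hdrop1, pvCond]
        split <;> ring
      · rw [PySem.List.pyRange_one_eq_nil (by exact_mod_cast (by omega : cells.length ≤ k + 1))]
        rw [pvPairCount_short _ (by simp; omega)]
        simp

theorem pvPairRun : ∀ (rest : List String) (head : String),
    pvPairCount (head :: rest)
      = (if PySem.Str.strip head != "" && head != "None" then (pvRunLen head rest : Int) else 0)
        + pvPairCount (rest.drop (pvRunLen head rest)) := by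
  intro rest
  induction rest with
  | nil => intro h; simp [pvPairCount, pvRunLen]
  | cons b t ih =>
      intro h
      by_cases hb : b = h
      · subst hb
        rw [show pvRunLen b (b :: t) = 1 + pvRunLen b t by simp [pvRunLen]]
        rw [pvPairCount, ih b]
        have hdrop : (b :: t).drop (1 + pvRunLen b t) = t.drop (pvRunLen b t) := by
          rw [Nat.add_comm, List.drop_succ_cons]
        rw [hdrop]
        have hc : pvCond b b = (PySem.Str.strip b != "" && b != "None") := by
          simp [pvCond]
        rw [hc]
        split <;> push_cast <;> ring
      · rw [show pvRunLen h (b :: t) = 0 by simp [pvRunLen, hb]]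
        have hc : pvCond b h = false := by
          simp [pvCond, hb]
        rw [pvPairCount, hc]
        simp

theorem pvRunF_eq_pair : ∀ (fuel : Nat) (l : List String), l.length ≤ fuel →
    pvRunCountF fuel l = pvPairCount l := by
  intro fuel
  induction fuel with
  | zero =>
      intro l hl
      match l, hl with
      | [], _ => rfl
  | succ fuel ih =>
      intro l hl
      match l with
      | [] => rfl
      | head :: rest =>
          rw [pvRunCountF, pvPairRun rest head]
          congr 1
          exact ih _ (by simp at hl ⊢; omega)

theorem pv_line_eq (acc : Int) (cells : List String) :
    (if cells.length > 1 then
        (PySem.List.pyRange 1 (cells.length : Int) 1).foldl (fun dc i =>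
          if (PySem.List.pyGetD cells i "") == (PySem.List.pyGetD cells (i-1) "")
              && PySem.Str.strip (PySem.List.pyGetD cells i "") != ""
              && (PySem.List.pyGetD cells i "") != "None"
          then dc + 1 else dc) acc
      else acc) = acc + pvRunCountF cells.length cells := by
  rw [pvRunF_eq_pair cells.length cells le_rfl]
  by_cases hl : cells.length > 1
  · rw [if_pos hl]
    have hb := pv_bridge cells cells.length 0 acc (by omega)
    simp only [Nat.cast_zero, zero_add, List.drop_zero] at hb
    rw [hb]
  · rw [if_neg hl, pvPairCount_short _ (by omega)]
    ring

-- ===== VERDICT (by name: the statement is the Claim_ definition above) =====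
theorem count_duplicate_patterns_spec : Claim_equal_count_duplicate_patterns := by
  intro text _
  unfold Spec_count_duplicate_patterns count_duplicate_patterns count_duplicate_patterns_alt
  show List.foldl _ (0 : Int) ((PySem.Str.split? text "\n").getD [])
      = List.foldl _ (0 : Int) ((PySem.Str.split? text "\n").getD [])
  congr 1
  funext acc line
  by_cases hp : PySem.Str.isIn "|" line
  · simp only [hp, if_true]
    exact pv_line_eq acc _
  · rw [if_neg hp, if_neg hp]
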